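-- pv_equiv track=rewrite | github.com/Victor-II/NLP-PROJECT | main.py | epiphora_search
-- ===== SOURCE A (Python) =====
-- def epiphora_search(chapter:list[list]) -> list[list[list]]:
--     res = []
--     epiphora = []
--
--     for i in range(len(chapter)-1):
--         if chapter[i][-1] == chapter[i+1][-1]:
--             if not epiphora:
--                 epiphora = [chapter[i], chapter[i+1]]
--             else:
--                 epiphora.append(chapter[i+1])
--         elif epiphora:
--             res.append(epiphora)
--             epiphora = []
--     if epiphora:
--         res.append(epiphora)
--
--     return res
-- ===== SOURCE B (Python) =====
-- def epiphora_search(chapter: list[list]) -> list[list[list]]: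
--     # Partition the chapter into maximal runs of consecutive rows sharing the
--     # last element, then keep only the runs of length >= 2.
--     runs = []
--     for row in chapter:
--         if runs and runs[-1][0][-1] == row[-1]:
--             runs[-1].append(row)
--         else:
--             runs.append([row])
--     return [r for r in runs if len(r) >= 2]
-- ===== Notes on version B (the rewrite author's own statement) =====
-- stated objective: simpler
-- what changed: Replaces A's index loop over adjacent pairs with a running epiphora accumulator and flag by a partition-then-filter pass: build the maximal runs of consecutive rows sharing the last element, then keep the runs of length >= 2.
import Mathlib
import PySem

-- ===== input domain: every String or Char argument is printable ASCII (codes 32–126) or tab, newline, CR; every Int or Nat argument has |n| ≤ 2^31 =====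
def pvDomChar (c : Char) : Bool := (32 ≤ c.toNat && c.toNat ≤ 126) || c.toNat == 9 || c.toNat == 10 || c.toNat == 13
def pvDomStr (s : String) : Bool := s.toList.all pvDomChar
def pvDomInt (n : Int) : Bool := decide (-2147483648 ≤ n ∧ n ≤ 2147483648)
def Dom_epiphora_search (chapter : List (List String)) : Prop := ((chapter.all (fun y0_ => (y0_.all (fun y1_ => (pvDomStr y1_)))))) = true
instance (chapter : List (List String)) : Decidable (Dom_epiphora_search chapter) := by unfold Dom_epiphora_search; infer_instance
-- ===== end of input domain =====

-- B changes A's running-accumulator/flag pass into partition-into-runs then filter (len ≥ 2): simpler decomposition, same cost.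

-- ===== PORT A =====
-- literal port of A's index loop; row[-1] is pyGetD row (-1) "" (Pre_ keeps every row nonempty, so the default is never used)
def epiphora_search (chapter : List (List String)) : List (List (List String)) :=
  let st := (PySem.List.pyRange 0 ((chapter.length : Int) - 1) 1).foldl
    (fun (st : List (List (List String)) × List (List String)) i =>
      if PySem.List.pyGetD (PySem.List.pyGetD chapter i []) (-1) "" =
         PySem.List.pyGetD (PySem.List.pyGetD chapter (i + 1) []) (-1) "" then
        if st.2 = [] then
          (st.1, [PySem.List.pyGetD chapter i [], PySem.List.pyGetD chapter (i + 1) []])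
        else
          (st.1, st.2 ++ [PySem.List.pyGetD chapter (i + 1) []])
      else if st.2 ≠ [] then (st.1 ++ [st.2], ([] : List (List String)))
      else st)
    ([], [])
  if st.2 ≠ [] then st.1 ++ [st.2] else st.1

-- ===== PORT B =====
-- literal port of Source B: fold building the list of maximal runs (extend the last run or open a new one), then filter len ≥ 2
def epiphora_search_alt (chapter : List (List String)) : List (List (List String)) :=
  let runs := chapter.foldl
    (fun (runs : List (List (List String))) row =>
      if runs ≠ [] ∧ PySem.List.pyGetD ((runs.getLastD []).headD []) (-1) "" =
                     PySem.List.pyGetD row (-1) "" then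
        runs.dropLast ++ [runs.getLastD [] ++ [row]]
      else runs ++ [[row]])
    []
  runs.filter (fun r => decide (2 ≤ r.length))

-- ===== PRECONDITION & SPEC =====
-- Pre_ excludes chapters of length ≥ 2 containing an empty row: there Python A (and B alike) raises IndexError on row[-1].
def Pre_epiphora_search (chapter : List (List String)) : Prop := chapter.length ≤ 1 ∨ ∀ row ∈ chapter, row ≠ []
instance (chapter : List (List String)) : Decidable (Pre_epiphora_search chapter) := by unfold Pre_epiphora_search; infer_instance
def pvWitness_epiphora_search : List (List String) := [["a", "x"], ["b", "x"], ["c"]]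

def Spec_epiphora_search (chapter : List (List String)) (out : List (List (List String))) : Prop := out = epiphora_search_alt chapter
instance (chapter : List (List String)) (out : List (List (List String))) : Decidable (Spec_epiphora_search chapter out) := by unfold Spec_epiphora_search; infer_instance

-- ===== CLAIM (what is proved, stated in full; the proofs are below) =====
def Claim_equal_epiphora_search : Prop := ∀ (chapter : List (List String)), Dom_epiphora_search chapter → Pre_epiphora_search chapter → Spec_epiphora_search chapter (epiphora_search chapter)

-- ===== LEMMAS AND PROOFS =====

-- key of a row: its last string (Python row[-1] with the never-used default)
def pvKey (r : List String) : String := PySem.List.pyGetD r (-1) ""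

-- A's loop body, phrased on the adjacent pair of rows it looks up
def pvStepA (st : List (List (List String)) × List (List String)) (p : List String × List String) :
    List (List (List String)) × List (List String) :=
  if pvKey p.1 = pvKey p.2 then
    if st.2 = [] then (st.1, [p.1, p.2]) else (st.1, st.2 ++ [p.2])
  else if st.2 ≠ [] then (st.1 ++ [st.2], ([] : List (List String)))
  else st

-- B's loop body
def pvStepB (runs : List (List (List String))) (row : List String) : List (List (List String)) :=
  if runs ≠ [] ∧ pvKey ((runs.getLastD []).headD []) = pvKey row then
    runs.dropLast ++ [runs.getLastD [] ++ [row]]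
  else runs ++ [[row]]

-- reference recursion: maximal runs, current run is c :: cs
def pvGo (c : List String) (cs : List (List String)) : List (List String) → List (List (List String))
  | [] => [c :: cs]
  | y :: ys => if pvKey c = pvKey y then pvGo c (cs ++ [y]) ys else (c :: cs) :: pvGo y [] ys

theorem pvStepA_eq (xs : List (List String)) (m : Nat) (hm : m + 1 < xs.length)
    (st : List (List (List String)) × List (List String)) :
    (fun (st : List (List (List String)) × List (List String)) (i : Int) =>
      if PySem.List.pyGetD (PySem.List.pyGetD xs i []) (-1) "" =
         PySem.List.pyGetD (PySem.List.pyGetD xs (i + 1) []) (-1) "" then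
        if st.2 = [] then
          (st.1, [PySem.List.pyGetD xs i [], PySem.List.pyGetD xs (i + 1) []])
        else
          (st.1, st.2 ++ [PySem.List.pyGetD xs (i + 1) []])
      else if st.2 ≠ [] then (st.1 ++ [st.2], ([] : List (List String)))
      else st) st (m : Int)
    = pvStepA st (xs[m], xs[m + 1]) := by
  have h1 : PySem.List.pyGetD xs (m : Int) [] = xs[m] :=
    PySem.List.pyGetD_ofNat xs m [] (by omega)
  have h2 : PySem.List.pyGetD xs ((m : Int) + 1) [] = xs[m + 1] := by
    have hc : ((m : Int) + 1) = ((m + 1 : Nat) : Int) := by push_cast; ring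
    rw [hc, PySem.List.pyGetD_ofNat xs (m + 1) [] hm]
  simp only [h1, h2, pvStepA, pvKey]

theorem pvFoldA_take (xs : List (List String)) :
    ∀ (m : Nat), m + 1 ≤ xs.length →
    ∀ (init : List (List (List String)) × List (List String)),
    (PySem.List.pyRange 0 (m : Int) 1).foldl
      (fun (st : List (List (List String)) × List (List String)) (i : Int) =>
        if PySem.List.pyGetD (PySem.List.pyGetD xs i []) (-1) "" =
           PySem.List.pyGetD (PySem.List.pyGetD xs (i + 1) []) (-1) "" then
          if st.2 = [] then
            (st.1, [PySem.List.pyGetD xs i [], PySem.List.pyGetD xs (i + 1) []])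
          else
            (st.1, st.2 ++ [PySem.List.pyGetD xs (i + 1) []])
        else if st.2 ≠ [] then (st.1 ++ [st.2], ([] : List (List String)))
        else st) init
    = ((xs.zip xs.tail).take m).foldl pvStepA init := by
  intro m
  induction m with
  | zero => intro _ init; simp
  | succ m ih =>
    intro hm init
    have hrange : PySem.List.pyRange 0 ((m + 1 : Nat) : Int) 1
        = PySem.List.pyRange 0 (m : Int) 1 ++ [(m : Int)] := by
      have : ((m + 1 : Nat) : Int) = (m : Int) + 1 := by push_cast; ring
      rw [this, PySem.List.pyRange_one_succ_right (by positivity)]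
    have hlen : m < (xs.zip xs.tail).length := by
      simp [List.length_zip, List.length_tail]; omega
    have hget : (xs.zip xs.tail)[m] = (xs[m], xs[m + 1]) := by
      have h1 : m < xs.length := by omega
      have h2 : m < xs.tail.length := by simp [List.length_tail]; omega
      simp [List.getElem_zip, List.getElem_tail]
      rfl
    have htake : (xs.zip xs.tail).take (m + 1)
        = (xs.zip xs.tail).take m ++ [(xs[m], xs[m + 1])] := by
      rw [List.take_add_one]; simp [List.getElem?_eq_getElem hlen, hget]
    rw [hrange, htake, List.foldl_append, List.foldl_append, ih (by omega) init]
    simp only [List.foldl_cons, List.foldl_nil]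
    exact pvStepA_eq xs m (by omega) _

-- the wrap-up after A's loop
def pvWrap (st : List (List (List String)) × List (List String)) : List (List (List String)) :=
  if st.2 ≠ [] then st.1 ++ [st.2] else st.1

theorem pvMain : ∀ (rest : List (List String)) (c : List String) (cs : List (List String))
    (res : List (List (List String))),
    pvKey ((c :: cs).getLast (by simp)) = pvKey c →
    pvWrap ((((c :: cs).getLast (by simp) :: rest).zip rest).foldl pvStepA
      (res, if cs = [] then [] else c :: cs))
    = res ++ (pvGo c cs rest).filter (fun r => decide (2 ≤ r.length)) := by
  intro rest
  induction rest with
  | nil =>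
    intro c cs res _
    cases cs with
    | nil => simp [pvWrap, pvGo]
    | cons a as => simp [pvWrap, pvGo]
  | cons y ys ih =>
    intro c cs res hk
    have hzip : (((c :: cs).getLast (by simp) :: y :: ys).zip (y :: ys))
        = ((c :: cs).getLast (by simp), y) :: ((y :: ys).zip ys) := by
      simp [List.zip]
    rw [hzip, List.foldl_cons]
    by_cases heq : pvKey c = pvKey y
    · -- extend the current run
      have hlast : ((c :: (cs ++ [y])).getLast (by simp)) = y := by
        simp
      have hstep : pvStepA (res, if cs = [] then [] else c :: cs)
          ((c :: cs).getLast (by simp), y) = (res, c :: (cs ++ [y])) := by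
        simp only [pvStepA]
        rw [hk, if_pos heq]
        cases cs with
        | nil => simp [List.getLast_singleton]
        | cons a as => simp
      rw [hstep]
      have h2 := ih c (cs ++ [y]) res (by rw [hlast, heq])
      rw [hlast, if_neg (by simp : ¬(cs ++ [y] = []))] at h2
      rw [h2]
      simp [pvGo, heq]
    · -- close the current run, open [y]
      have hstep : pvStepA (res, if cs = [] then [] else c :: cs)
          ((c :: cs).getLast (by simp), y)
          = ((if cs = [] then res else res ++ [c :: cs]), ([] : List (List String))) := by
        simp only [pvStepA]
        rw [hk, if_neg heq]
        cases cs with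
        | nil => simp
        | cons a as => simp
      rw [hstep]
      have h2 := ih y [] (if cs = [] then res else res ++ [c :: cs])
        (by simp [List.getLast_singleton])
      rw [List.getLast_singleton, if_pos rfl] at h2
      rw [h2]
      cases cs with
      | nil => simp [pvGo, heq]
      | cons a as => simp [pvGo, heq]

theorem pvFoldB : ∀ (rest : List (List String)) (done : List (List (List String)))
    (c : List String) (cs : List (List String)),
    rest.foldl pvStepB (done ++ [c :: cs]) = done ++ pvGo c cs rest := by
  intro rest
  induction rest with
  | nil => intro done c cs; simp [pvGo]
  | cons y ys ih =>
    intro done c cs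
    rw [List.foldl_cons]
    by_cases heq : pvKey c = pvKey y
    · have : pvStepB (done ++ [c :: cs]) y = done ++ [c :: (cs ++ [y])] := by
        simp [pvStepB, heq]
      rw [this, ih, pvGo, if_pos heq]
    · have : pvStepB (done ++ [c :: cs]) y = (done ++ [c :: cs]) ++ [[y]] := by
        simp [pvStepB, heq]
      rw [this]
      have := ih (done ++ [c :: cs]) y []
      rw [this, pvGo, if_neg heq]
      simp

-- ===== VERDICT (by name: the statement is the Claim_ definition above) =====
theorem epiphora_search_spec : Claim_equal_epiphora_search := by
  intro chapter _ _
  unfold Spec_epiphora_search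
  cases chapter with
  | nil =>
    simp [epiphora_search, epiphora_search_alt, PySem.List.pyRange_one_eq_nil]
  | cons x xs =>
    -- B side: first step opens the run [x], then pvFoldB
    have hfunB : (fun (runs : List (List (List String))) (row : List String) =>
        if runs ≠ [] ∧ PySem.List.pyGetD ((runs.getLastD []).headD []) (-1) "" =
                       PySem.List.pyGetD row (-1) "" then
          runs.dropLast ++ [runs.getLastD [] ++ [row]]
        else runs ++ [[row]]) = pvStepB := by
      funext runs row; rfl
    have hB : epiphora_search_alt (x :: xs)
        = (pvGo x [] xs).filter (fun r => decide (2 ≤ r.length)) := by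
      unfold epiphora_search_alt
      dsimp only
      rw [hfunB, List.foldl_cons]
      have h1 : pvStepB [] x = [] ++ [x :: ([] : List (List String))] := by
        simp [pvStepB]
      rw [h1, pvFoldB xs [] x []]
      simp
    -- A side: index fold = zip fold, then pvMain
    have hA : epiphora_search (x :: xs)
        = pvWrap (((x :: xs).zip xs).foldl pvStepA ([], [])) := by
      unfold epiphora_search pvWrap
      dsimp only
      have hlen : (((x :: xs).length : Int) - 1) = ((xs.length : Nat) : Int) := by
        simp
      rw [hlen, pvFoldA_take (x :: xs) xs.length (by simp)]
      have htk : ((x :: xs).zip (x :: xs).tail).take xs.length = (x :: xs).zip xs := by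
        apply List.take_of_length_le
        simp
      rw [htk]
    rw [hA, hB]
    have h2 := pvMain xs x [] [] (by simp [List.getLast_singleton])
    rw [List.getLast_singleton, if_pos rfl] at h2
    rw [h2, List.nil_append]
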